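-- pv_equiv track=rewrite | github.com/drsamibioinfo/DNA-Probe-Generation | probing.py | get_aa_variation
-- ===== SOURCE A (Python) =====
-- def get_aa_variation(codons, aa):
--     # ['AAA','BBB','ABB']
--     codes = codons.get(aa,None)
--     if not codes:
--         return 0
--     variation = 0
--     zipped_ = zip(*codes)
--     for elem in zipped_:
--         if not all(el == elem[0] for el in elem):
--             variation += 1
--
--     return variation
-- ===== SOURCE B (Python) =====
-- def get_aa_variation(codons, aa):
--     codes = codons.get(aa)
--     if not codes:
--         return 0
--     ref = codes[0]
--     L = min(len(c) for c in codes)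
--     differs = [False] * L
--     for code in codes:
--         differs = [d or code[j] != ref[j] for j, d in enumerate(differs)]
--     return sum(differs)
-- ===== Notes on version B (the rewrite author's own statement) =====
-- stated objective: alternative
-- what changed: B never transposes: it keeps codes[0] as a reference and sweeps the codon strings row by row, or-accumulating a per-position differ-flag list of length min(len), then sums the flags, instead of A's zip(*codes) transpose with an all() test per column.
import Mathlib
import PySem

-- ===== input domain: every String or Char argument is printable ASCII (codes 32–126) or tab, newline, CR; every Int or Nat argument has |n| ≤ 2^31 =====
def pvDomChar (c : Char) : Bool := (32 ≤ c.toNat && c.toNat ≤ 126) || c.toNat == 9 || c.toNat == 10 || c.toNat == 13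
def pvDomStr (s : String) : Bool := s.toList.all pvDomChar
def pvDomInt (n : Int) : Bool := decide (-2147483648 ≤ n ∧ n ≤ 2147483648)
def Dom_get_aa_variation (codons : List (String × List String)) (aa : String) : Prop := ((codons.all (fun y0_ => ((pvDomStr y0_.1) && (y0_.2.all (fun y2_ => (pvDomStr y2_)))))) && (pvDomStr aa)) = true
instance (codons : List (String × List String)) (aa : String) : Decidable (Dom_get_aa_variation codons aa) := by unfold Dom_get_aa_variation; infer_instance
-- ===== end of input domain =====

-- B replaces A's zip(*codes) transpose + per-column all() by a row-major sweep that
-- or-accumulates a per-position differ-flag list against codes[0] and sums the flags.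

-- ===== PORT A =====
-- min(len over rows), first row's length as the seed (rows nonempty where used)
def pvMinLen (rows : List (List Char)) : Nat :=
  match rows with
  | [] => 0
  | r :: rs => rs.foldl (fun m r' => min m r'.length) r.length

-- zip(*codes): columns j < min length; each index is in range there, so getD is exact
def pvZipStar (rows : List (List Char)) : List (List Char) :=
  (List.range (pvMinLen rows)).map (fun j => rows.map (fun r => r.getD j ' '))

def get_aa_variation (codons : List (String × List String)) (aa : String) : Int :=
  match (PySem.Dict.mk codons).get? aa with
  | none => 0
  | some codes =>
    if codes.isEmpty then 0
    else
      let rows := codes.map String.toList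
      (pvZipStar rows).foldl
        (fun variation elem =>
          if elem.all (fun el => el == elem.headD ' ') then variation else variation + 1) 0

-- ===== PORT B =====
def get_aa_variation_alt (codons : List (String × List String)) (aa : String) : Int :=
  match (PySem.Dict.mk codons).get? aa with
  | none => 0
  | some codes =>
    if codes.isEmpty then 0
    else
      let rows := codes.map String.toList
      let ref := rows.headD []
      let L := pvMinLen rows
      let differs := rows.foldl
        (fun d row => d.mapIdx (fun j b => b || decide (row.getD j ' ' ≠ ref.getD j ' ')))
        (List.replicate L false)
      differs.foldl (fun s b => s + if b then (1 : Int) else 0) 0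

-- ===== PRECONDITION & SPEC =====
def Spec_get_aa_variation (codons : List (String × List String)) (aa : String) (out : Int) : Prop := out = get_aa_variation_alt codons aa
instance (codons : List (String × List String)) (aa : String) (out : Int) : Decidable (Spec_get_aa_variation codons aa out) := by unfold Spec_get_aa_variation; infer_instance

-- ===== CLAIM (what is proved, stated in full; the proofs are below) =====
def Claim_equal_get_aa_variation : Prop := ∀ (codons : List (String × List String)) (aa : String), Dom_get_aa_variation codons aa → Spec_get_aa_variation codons aa (get_aa_variation codons aa)

-- ===== LEMMAS AND PROOFS =====

-- mapIdx over a (range L).map collapses to a single map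
theorem pv_mapIdx_range_map {α β : Type} (L : Nat) (g : Nat → α) (h : Nat → α → β) :
    ((List.range L).map g).mapIdx (fun j b => h j b)
      = (List.range L).map (fun j => h j (g j)) := by
  apply List.ext_getElem
  · simp
  · intro i h1 h2
    simp

-- B's row fold, characterised on a range-map start
theorem pv_fold_rows (p : List Char → Nat → Bool) :
    ∀ (rows : List (List Char)) (L : Nat) (g : Nat → Bool),
    rows.foldl (fun d row => d.mapIdx (fun j b => b || p row j)) ((List.range L).map g)
      = (List.range L).map (fun j => g j || rows.any (fun row => p row j)) := by
  intro rows
  induction rows with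
  | nil => intro L g; simp
  | cons r rs ih =>
    intro L g
    simp only [List.foldl_cons]
    rw [pv_mapIdx_range_map L g (fun j b => b || p r j), ih L (fun j => g j || p r j)]
    simp [Bool.or_assoc]

-- A's counting fold equals B's summing fold, pointwise
theorem pv_count_eq (q : Nat → Bool) :
    ∀ (js : List Nat) (v : Int),
    js.foldl (fun variation j => if q j then variation else variation + 1) v
      = js.foldl (fun s j => s + if (!q j) then (1 : Int) else 0) v := by
  intro js
  induction js with
  | nil => intro v; rfl
  | cons j js ih =>
    intro v
    simp only [List.foldl_cons]
    rw [ih]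
    by_cases hq : q j = true <;> simp [hq]

theorem get_aa_variation_eq_alt (codons : List (String × List String)) (aa : String) :
    get_aa_variation codons aa = get_aa_variation_alt codons aa := by
  unfold get_aa_variation get_aa_variation_alt
  cases h : (PySem.Dict.mk codons).get? aa with
  | none => rfl
  | some codes =>
    cases codes with
    | nil => rfl
    | cons c cs =>
      simp only [List.isEmpty_cons, if_false, Bool.false_eq_true]
      set rows := (c :: cs).map String.toList with hrows
      set L := pvMinLen rows with hL
      -- B side: flags list as a range-map
      have hrep : List.replicate L false = (List.range L).map (fun _ => false) := by
        simp [List.map_const']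
      rw [hrep, pv_fold_rows (fun row j => decide (row.getD j ' ' ≠ (rows.headD []).getD j ' ')) rows L (fun _ => false)]
      -- both sides are folds over (List.range L).map …
      unfold pvZipStar
      rw [← hL, List.foldl_map, List.foldl_map]
      rw [pv_count_eq (fun j => (rows.map (fun r => r.getD j ' ')).all
            (fun el => el == (rows.map (fun r => r.getD j ' ')).headD ' '))]
      congr 1
      funext s j
      have hhead : (rows.map (fun r => r.getD j ' ')).headD ' ' = (rows.headD []).getD j ' ' := by
        simp [hrows]
      have hcond : (!(rows.map (fun r => r.getD j ' ')).all
            (fun el => el == (rows.map (fun r => r.getD j ' ')).headD ' '))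
          = (false || rows.any (fun row => decide (row.getD j ' ' ≠ (rows.headD []).getD j ' '))) := by
        rw [hhead, Bool.false_or, Bool.eq_iff_iff]
        simp [List.any_eq_true]
      rw [← hcond]

-- ===== VERDICT (by name: the statement is the Claim_ definition above) =====
theorem get_aa_variation_spec : Claim_equal_get_aa_variation := by
  intro codons aa _
  unfold Spec_get_aa_variation
  exact get_aa_variation_eq_alt codons aa
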